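-- pv_equiv track=rewrite | github.com/jesusvillota/cluster-kit | src/cluster_kit/sync/transfer.py | _is_valid_host
-- ===== SOURCE A (Python) =====
-- def _is_valid_host(host_str: str) -> bool:
--     """Check if a string looks like a valid host identifier.
--
--     Valid hosts:
--         - "cluster"
--         - "user@cluster"
--         - "192.168.1.1" (IP addresses)
--         - "host-name" (with hyphens)
--         - "host_name" (with underscores)
--
--     Invalid:
--         - Empty string
--         - Starts with / (would be local path)
--         - Starts with . (would be relative path)
--         - Contains invalid characters
--
--     Args:
--         host_str: String to validate
--
--     Returns:
--         True if valid host identifier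
--     """
--     if not host_str or len(host_str) < 1:
--         return False
--
--     # Must not start with path indicators
--     if host_str.startswith(("/", ".", "~")):
--         return False
--
--     # Must not contain path separators (would be ambiguous)
--     if "/" in host_str:
--         return False
--
--     # Valid hostname chars: alphanumerics, hyphens, underscores, @ for user@host
--     # IPv4 addresses: digits and dots
--     valid_chars = set(
--         "abcdefghijklmnopqrstuvwxyzABCDEFGHIJKLMNOPQRSTUVWXYZ0123456789-_.@"
--     )
--
--     return all(c in valid_chars for c in host_str)
-- ===== SOURCE B (Python) =====
-- import re
--
-- _HOST_RE = re.compile(r'\A(?![.~/])[A-Za-z0-9._@-]+\Z')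
--
-- def _is_valid_host(host_str: str) -> bool:
--     """Validate a host identifier with a single anchored regex:
--     non-empty, first char not '.', '~' or '/', all chars in [A-Za-z0-9._@-]."""
--     return bool(_HOST_RE.match(host_str))
-- ===== Notes on version B (the rewrite author's own statement) =====
-- stated objective: idiomatic
-- what changed: Replaced the early-return chain of startswith, substring and per-character set-membership scans by a single anchored compiled regular expression whose negative lookahead and character class encode all the rules at once.
import Mathlib
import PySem

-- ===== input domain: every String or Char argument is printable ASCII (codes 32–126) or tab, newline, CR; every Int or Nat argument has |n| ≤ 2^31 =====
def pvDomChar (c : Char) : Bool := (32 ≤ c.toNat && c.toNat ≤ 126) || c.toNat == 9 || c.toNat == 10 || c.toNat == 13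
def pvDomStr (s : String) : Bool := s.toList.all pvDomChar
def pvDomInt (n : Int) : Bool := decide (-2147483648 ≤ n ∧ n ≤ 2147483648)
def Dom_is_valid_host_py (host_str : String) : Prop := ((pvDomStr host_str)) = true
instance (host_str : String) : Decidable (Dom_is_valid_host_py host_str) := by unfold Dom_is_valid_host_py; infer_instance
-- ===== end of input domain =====

-- B replaces A's early-return chain (startswith tuple, '/' scan, per-char set membership)
-- by a single anchored regex match, ported as that regex's matching semantics (idiomatic; measured faster at large sizes in a timing run).

-- ===== PORT A =====
def pvValidChars : PySem.Set Char :=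
  PySem.Set.ofList "abcdefghijklmnopqrstuvwxyzABCDEFGHIJKLMNOPQRSTUVWXYZ0123456789-_.@".toList

def is_valid_host_py (host_str : String) : Bool :=
  -- 'not host_str or len(host_str) < 1'
  if PySem.Str.len host_str == 0 || PySem.Str.len host_str < 1 then false
  -- host_str.startswith(("/", ".", "~"))
  else if PySem.Str.startswith host_str "/" || PySem.Str.startswith host_str "." || PySem.Str.startswith host_str "~" then false
  -- '"/" in host_str'
  else if PySem.Str.isIn "/" host_str then false
  -- all(c in valid_chars for c in host_str)
  else host_str.toList.all (fun c => PySem.Set.contains pvValidChars c)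

-- ===== PORT B =====
-- one character of the regex class [A-Za-z0-9._@-]
def pvClassChar (c : Char) : Bool :=
  (('A' ≤ c && c ≤ 'Z') || ('a' ≤ c && c ≤ 'z') || ('0' ≤ c && c ≤ '9')
    || c == '.' || c == '_' || c == '@' || c == '-')

-- Hand port of Source B's re.match(r'\A(?![.~/])[A-Za-z0-9._@-]+\Z', host_str) coerced to bool:
-- exact for this regex — it matches iff the string is non-empty, the first character fails the
-- negative lookahead (?![.~/]) and every character is in the class.
def is_valid_host_py_alt (host_str : String) : Bool :=
  match host_str.toList with
  | [] => false
  | c :: _ => !(c == '.' || c == '~' || c == '/') && host_str.toList.all pvClassChar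

-- ===== PRECONDITION & SPEC =====
def Spec_is_valid_host_py (host_str : String) (out : Bool) : Prop := out = is_valid_host_py_alt host_str
instance (host_str : String) (out : Bool) : Decidable (Spec_is_valid_host_py host_str out) := by unfold Spec_is_valid_host_py; infer_instance

-- ===== CLAIM (what is proved, stated in full; the proofs are below) =====
def Claim_equal_is_valid_host_py : Prop := ∀ (host_str : String), Dom_is_valid_host_py host_str → Spec_is_valid_host_py host_str (is_valid_host_py host_str)

-- ===== LEMMAS AND PROOFS =====

-- A's Python set and B's regex class accept exactly the same characters.
lemma contains_pvValidChars_eq (c : Char) :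
    PySem.Set.contains pvValidChars c = pvClassChar c := by
  rw [Bool.eq_iff_iff]
  simp [pvValidChars, pvClassChar, PySem.Set.contains, PySem.Set.ofList, Char.le_def,
    Char.ext_iff, UInt32.le_iff_toNat_le, UInt32.toNat_inj.symm]
  omega

lemma pvClassChar_slash : pvClassChar '/' = false := by decide

lemma pv_list (l : List Char) :
    (if ((l.length : Int) == 0 || decide ((l.length : Int) < 1)) = true then false
     else if (PySem.Chars.startswith l ['/'] || PySem.Chars.startswith l ['.'] ||
              PySem.Chars.startswith l ['~']) = true then false
     else if PySem.Chars.isIn ['/'] l = true then false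
     else l.all fun c => pvClassChar c)
    = match l with
      | [] => false
      | c :: _ => !(c == '.' || c == '~' || c == '/') && l.all pvClassChar := by
  rcases l with _ | ⟨c, t⟩
  · simp
  · rw [Bool.eq_iff_iff]
    have hsw : ∀ x : Char, PySem.Chars.startswith (c :: t) [x] = (c == x) := by
      intro x
      rw [Bool.eq_iff_iff, PySem.Chars.startswith_iff,
        show [x] = x :: ([] : List Char) from rfl, List.cons_prefix_cons]
      simp only [List.nil_prefix, and_true, beq_iff_eq]
      exact eq_comm
    have hin : PySem.Chars.isIn ['/'] (c :: t) = true ↔ '/' ∈ c :: t := by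
      rw [PySem.Chars.isIn_iff_infix]
      constructor
      · intro hi; exact hi.mem (by simp)
      · intro hm; obtain ⟨l1, l2, heq⟩ := List.append_of_mem hm
        rw [heq]; exact ⟨l1, l2, by simp⟩
    have hall : '/' ∈ c :: t → (c :: t).all pvClassChar = false := by
      intro hm
      simp only [List.all_eq_false]
      exact ⟨'/', hm, by simp [pvClassChar_slash]⟩
    simp only [hsw]
    split_ifs with h1 h2 h3
    · exfalso; simp at h1; omega
    · -- first char is '/', '.' or '~' : B's lookahead fails
      simp only [Bool.or_eq_true, beq_iff_eq] at h2
      rcases h2 with (rfl | rfl) | rfl <;> simp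
    · -- '/' occurs somewhere: the class check fails too
      rw [hin] at h3
      simp [hall h3]
    · simp only [Bool.or_eq_true, beq_iff_eq] at h2
      push Not at h2
      simp [h2.1.1, h2.1.2, h2.2]

lemma pv_main (s : String) : is_valid_host_py s = is_valid_host_py_alt s := by
  unfold is_valid_host_py is_valid_host_py_alt
  have e1 : "/".toList = ['/'] := rfl
  have e2 : ".".toList = ['.'] := rfl
  have e3 : "~".toList = ['~'] := rfl
  simp only [PySem.Str.len_eq, PySem.Str.startswith_eq, PySem.Str.isIn_eq,
    contains_pvValidChars_eq, e1, e2, e3]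
  exact pv_list s.toList

-- ===== VERDICT (by name: the statement is the Claim_ definition above) =====
theorem is_valid_host_py_spec : Claim_equal_is_valid_host_py := by
  intro s _
  unfold Spec_is_valid_host_py
  exact pv_main s
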